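-- pv_equiv track=rewrite | github.com/squirtledude/ece511_final_project | neusim/npusim/frontend/llm_ops_lib.py | compute_reduce_scatter_elem_per_chip
-- ===== SOURCE A (Python) =====
-- from math import floor, ceil
-- from typing import Any, Sequence
--
-- def compute_reduce_scatter_elem_per_chip(
--     elem_per_chip: int,
--     dim_sizes: Sequence[int],
-- ) -> int:
--     tot_elem = 0
--     cur_stage_elem = elem_per_chip
--     for dim_size in dim_sizes:
--         tot_elem += cur_stage_elem
--         cur_stage_elem = ceil(cur_stage_elem / dim_size)
--     return tot_elem
-- ===== SOURCE B (Python) =====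
-- def compute_reduce_scatter_elem_per_chip(
--     elem_per_chip: int,
--     dim_sizes,
-- ) -> int:
--     # Divide-and-conquer: solve(cur, ds) returns (sum of the per-stage element
--     # counts across the stages ds, and the element count left after them), by
--     # splitting ds in half and chaining the halves; exact integer ceiling
--     # division -((-x) // d) replaces A's float ceil(x / d).
--     def solve(cur, ds):
--         if not ds:
--             return 0, cur
--         if len(ds) == 1:
--             return cur, -((-cur) // ds[0])
--         mid = len(ds) // 2
--         s1, c1 = solve(cur, ds[:mid])
--         s2, c2 = solve(c1, ds[mid:])
--         return s1 + s2, c2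
--
--     total, _ = solve(elem_per_chip, list(dim_sizes))
--     return total
-- ===== Notes on version B (the rewrite author's own statement) =====
-- stated objective: alternative
-- what changed: B replaces A's single left-to-right loop threading a (total, current) accumulator pair by a divide-and-conquer recursion: a helper splits the stage list in half, solves each half to a (stage-sum, remaining-count) pair, and chains the halves; it also uses exact integer ceiling division -((-x)//d) instead of A's float-based ceil(x/d).
import Mathlib
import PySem

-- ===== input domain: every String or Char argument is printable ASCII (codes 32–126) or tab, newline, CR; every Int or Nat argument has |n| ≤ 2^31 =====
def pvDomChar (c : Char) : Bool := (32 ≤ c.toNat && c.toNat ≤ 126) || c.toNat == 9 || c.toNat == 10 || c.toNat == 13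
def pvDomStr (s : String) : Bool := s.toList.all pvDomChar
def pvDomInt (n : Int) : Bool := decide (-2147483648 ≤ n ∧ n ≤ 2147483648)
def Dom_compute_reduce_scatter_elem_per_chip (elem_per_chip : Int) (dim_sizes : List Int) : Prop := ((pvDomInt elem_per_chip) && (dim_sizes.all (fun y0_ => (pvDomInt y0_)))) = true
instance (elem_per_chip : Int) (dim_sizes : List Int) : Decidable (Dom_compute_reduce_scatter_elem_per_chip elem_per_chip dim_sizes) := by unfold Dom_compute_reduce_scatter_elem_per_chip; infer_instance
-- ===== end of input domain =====

-- B replaces A's single left-to-right loop over a (total, current) pair by a divide-and-conquer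
-- recursion that splits the stage list in half and chains the halves (objective: alternative).
-- Python's ceil(cur / d) (float division) is ported as exact ceiling division -((-cur) // d):
-- on Dom every stage value v satisfies |v| ≤ 2^31 + 1, where the float quotient's rounding error
-- (≤ |v|·2^-53 / |d|) is strictly smaller than any nonzero fractional part (≥ 1/|d|), so the
-- float ceil equals the exact integer ceil.

-- ===== PORT A =====
def compute_reduce_scatter_elem_per_chip (elem_per_chip : Int) (dim_sizes : List Int) : Int :=
  (dim_sizes.foldl
    (fun (s : Int × Int) dim_size =>
      (s.1 + s.2, -(PySem.Int.floordiv (-s.2) dim_size)))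
    (0, elem_per_chip)).1

-- ===== PORT B =====
-- Source B's inner solve: (sum of per-stage counts across ds, count remaining after ds)
def rsSolve (cur : Int) (ds : List Int) : Int × Int :=
  match ds with
  | [] => (0, cur)
  | [d] => (cur, -(PySem.Int.floordiv (-cur) d))
  | d1 :: d2 :: rest =>
    let ds' := d1 :: d2 :: rest
    let mid := ds'.length / 2
    let p1 := rsSolve cur (ds'.take mid)
    let p2 := rsSolve p1.2 (ds'.drop mid)
    (p1.1 + p2.1, p2.2)
termination_by ds.length
decreasing_by
  · simp [List.length_take]; omega
  · simp [List.length_drop]; omega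

def compute_reduce_scatter_elem_per_chip_alt (elem_per_chip : Int) (dim_sizes : List Int) : Int :=
  (rsSolve elem_per_chip dim_sizes).1

-- ===== PRECONDITION & SPEC =====
-- Pre_ excludes exactly the inputs where Python A raises ZeroDivisionError: a 0 in dim_sizes.
def Pre_compute_reduce_scatter_elem_per_chip (elem_per_chip : Int) (dim_sizes : List Int) : Prop :=
  ∀ d ∈ dim_sizes, d ≠ 0
instance (elem_per_chip : Int) (dim_sizes : List Int) : Decidable (Pre_compute_reduce_scatter_elem_per_chip elem_per_chip dim_sizes) := by unfold Pre_compute_reduce_scatter_elem_per_chip; infer_instance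
def pvWitness_compute_reduce_scatter_elem_per_chip : Int × List Int := (8, [2, 2, 2])

def Spec_compute_reduce_scatter_elem_per_chip (elem_per_chip : Int) (dim_sizes : List Int) (out : Int) : Prop := out = compute_reduce_scatter_elem_per_chip_alt elem_per_chip dim_sizes
instance (elem_per_chip : Int) (dim_sizes : List Int) (out : Int) : Decidable (Spec_compute_reduce_scatter_elem_per_chip elem_per_chip dim_sizes out) := by unfold Spec_compute_reduce_scatter_elem_per_chip; infer_instance

-- ===== CLAIM (what is proved, stated in full; the proofs are below) =====
def Claim_equal_compute_reduce_scatter_elem_per_chip : Prop := ∀ (elem_per_chip : Int) (dim_sizes : List Int), Dom_compute_reduce_scatter_elem_per_chip elem_per_chip dim_sizes → Pre_compute_reduce_scatter_elem_per_chip elem_per_chip dim_sizes → Spec_compute_reduce_scatter_elem_per_chip elem_per_chip dim_sizes (compute_reduce_scatter_elem_per_chip elem_per_chip dim_sizes)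

-- ===== LEMMAS AND PROOFS =====
-- A's loop step, named for the lemmas.
def rsStep (s : Int × Int) (d : Int) : Int × Int :=
  (s.1 + s.2, -(PySem.Int.floordiv (-s.2) d))

-- A's fold is offset-linear in the running total.
theorem rs_foldl_shift (ds : List Int) (t e : Int) :
    ds.foldl rsStep (t, e)
      = (t + (ds.foldl rsStep (0, e)).1, (ds.foldl rsStep (0, e)).2) := by
  induction ds generalizing t e with
  | nil => simp
  | cons d ds ih =>
      simp only [List.foldl_cons]
      rw [ih, ih (rsStep (0, e) d).1]
      simp [rsStep, add_assoc]

-- the divide-and-conquer solve computes exactly A's fold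
theorem rsSolve_eq (n : Nat) : ∀ (ds : List Int), ds.length = n → ∀ (cur : Int),
    rsSolve cur ds = ds.foldl rsStep (0, cur) := by
  induction n using Nat.strong_induction_on with
  | _ n ih =>
    intro ds hlen cur
    match ds with
    | [] => simp [rsSolve]
    | [d] => simp [rsSolve, rsStep]
    | d1 :: d2 :: rest =>
      rw [rsSolve]
      have hlen2 : 2 ≤ (d1 :: d2 :: rest).length := by simp
      set L := d1 :: d2 :: rest with hL
      set mid := L.length / 2 with hmid
      have htake : (L.take mid).length < n := by
        simp only [List.length_take]; omega
      have hdrop : (L.drop mid).length < n := by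
        simp only [List.length_drop]; omega
      rw [ih _ htake _ rfl, ih _ hdrop _ rfl]
      conv_rhs => rw [← List.take_append_drop mid L, List.foldl_append]
      rw [rs_foldl_shift (L.drop mid) (L.take mid |>.foldl rsStep (0, cur)).1]

-- ===== VERDICT (by name: the statement is the Claim_ definition above) =====
theorem compute_reduce_scatter_elem_per_chip_spec : Claim_equal_compute_reduce_scatter_elem_per_chip := by
  intro e ds _ _
  unfold Spec_compute_reduce_scatter_elem_per_chip
  unfold compute_reduce_scatter_elem_per_chip compute_reduce_scatter_elem_per_chip_alt
  rw [rsSolve_eq ds.length ds rfl e]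
  rfl
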